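-- pv_equiv track=rewrite | github.com/BertrandDecoster/InductorHtn | src/Python/htn_test_framework.py | no_duplicate_positions
-- ===== SOURCE A (Python) =====
-- from typing import List, Dict, Callable, Optional, Any, Tuple
--
-- def no_duplicate_positions(facts: List[str], predicate: str = "at") -> bool:
--     """
--     Check that no two entities share the same position.
--     Useful for game invariant "one unit per tile".
--     """
--     positions = []
--     for fact in facts:
--         if fact.startswith(f"{predicate}("):
--             # Extract position part (everything after first comma or the second arg)
--             # at(Unit, Position) -> Position
--             inner = fact[len(predicate)+1:-1]  # Remove "at(" and ")"
--             parts = inner.split(", ", 1)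
--             if len(parts) >= 2:
--                 pos = parts[1]
--                 if pos in positions:
--                     return False
--                 positions.append(pos)
--     return True
-- ===== SOURCE B (Python) =====
-- def _position(fact, prefix):
--     """Return the position argument of a fact like 'at(Unit, Pos)', or None."""
--     if fact.startswith(prefix):
--         parts = fact[len(prefix):-1].split(", ", 1)
--         if len(parts) >= 2:
--             return parts[1]
--     return None
--
--
-- def no_duplicate_positions(facts, predicate="at"):
--     """
--     Check that no two entities share the same position.
--     Useful for game invariant "one unit per tile".
--     """
--     prefix = f"{predicate}("
--     positions = [p for fact in facts if (p := _position(fact, prefix)) is not None]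
--     return len(positions) == len(set(positions))
-- ===== Notes on version B (the rewrite author's own statement) =====
-- stated objective: faster
-- what changed: Extraction is factored into a helper feeding one comprehension that collects all positions, and the incremental scan-with-early-return list-membership test is replaced by a single whole-list uniqueness check len(positions) == len(set(positions)).
import Mathlib
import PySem

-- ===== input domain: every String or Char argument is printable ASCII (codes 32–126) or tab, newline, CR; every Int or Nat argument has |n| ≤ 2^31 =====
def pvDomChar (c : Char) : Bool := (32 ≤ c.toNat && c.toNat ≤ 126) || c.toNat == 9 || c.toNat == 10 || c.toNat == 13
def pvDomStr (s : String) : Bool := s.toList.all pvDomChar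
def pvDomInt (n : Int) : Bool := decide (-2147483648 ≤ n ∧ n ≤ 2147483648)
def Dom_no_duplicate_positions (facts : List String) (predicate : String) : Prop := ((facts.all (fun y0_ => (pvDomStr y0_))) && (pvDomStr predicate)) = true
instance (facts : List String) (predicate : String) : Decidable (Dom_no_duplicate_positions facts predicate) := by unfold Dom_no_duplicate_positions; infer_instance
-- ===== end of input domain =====

-- B factors the parse into a helper feeding one comprehension and replaces the
-- quadratic incremental list-membership scan with a whole-list len == len(set) uniqueness check (measured faster).

-- ===== PORT A =====
-- A's for-loop over facts with the growing `positions` accumulator and early `return False`.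
def pvA_loop (predicate : String) (facts : List String) (positions : List String) : Bool :=
  match facts with
  | [] => true
  | fact :: rest =>
    if PySem.Str.startswith fact (predicate ++ "(") then
      -- inner = fact[len(predicate)+1:-1]
      let inner := PySem.Str.slice fact (some ((PySem.Str.len predicate : Int) + 1)) (some (-1))
      -- parts = inner.split(", ", 1); sep ≠ "" so splitMax? is always `some`
      let parts := (PySem.Str.splitMax? inner ", " 1).getD []
      match parts with
      | _ :: pos :: _ =>        -- len(parts) >= 2; pos = parts[1]
        if positions.contains pos then false
        else pvA_loop predicate rest (positions ++ [pos])
      | _ => pvA_loop predicate rest positions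
    else pvA_loop predicate rest positions

def no_duplicate_positions (facts : List String) (predicate : String) : Bool :=
  pvA_loop predicate facts []

-- ===== PORT B =====
-- helper _position(fact, prefix): the position argument of the fact, or None
def pvPosition? (fact : String) (pre : String) : Option String :=
  if PySem.Str.startswith fact pre then
    -- parts = fact[len(prefix):-1].split(", ", 1)
    let parts := (PySem.Str.splitMax? (PySem.Str.slice fact (some (PySem.Str.len pre : Int)) (some (-1))) ", " 1).getD []
    match parts with
    | _ :: pos :: _ => some pos   -- return parts[1] when len(parts) >= 2
    | _ => none
  else none

def no_duplicate_positions_alt (facts : List String) (predicate : String) : Bool :=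
  let pre := predicate ++ "("
  let positions := facts.filterMap (fun fact => pvPosition? fact pre)
  ((positions.length : Int) == PySem.Set.len (PySem.Set.ofList positions))

-- ===== PRECONDITION & SPEC =====
def Spec_no_duplicate_positions (facts : List String) (predicate : String) (out : Bool) : Prop := out = no_duplicate_positions_alt facts predicate
instance (facts : List String) (predicate : String) (out : Bool) : Decidable (Spec_no_duplicate_positions facts predicate out) := by unfold Spec_no_duplicate_positions; infer_instance

-- ===== CLAIM (what is proved, stated in full; the proofs are below) =====
def Claim_equal_no_duplicate_positions : Prop := ∀ (facts : List String) (predicate : String), Dom_no_duplicate_positions facts predicate → Spec_no_duplicate_positions facts predicate (no_duplicate_positions facts predicate)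

-- ===== LEMMAS AND PROOFS =====

-- Set.add grows the carrier by at most one element.
theorem pv_foldl_add_le (l s : List String) :
    (l.foldl PySem.Set.add s).length ≤ s.length + l.length := by
  induction l generalizing s with
  | nil => simp
  | cons x l ih =>
    simp only [List.foldl_cons]
    refine le_trans (ih (PySem.Set.add s x)) ?_
    by_cases h : x ∈ s
    · have hadd : PySem.Set.add s x = s := by
        simp only [PySem.Set.add]; rw [if_pos (by simpa using h)]
      rw [hadd]; simp only [List.length_cons]; omega
    · have hadd : PySem.Set.add s x = s ++ [x] := by
        simp only [PySem.Set.add]; rw [if_neg (by simpa using h)]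
      rw [hadd]; simp only [List.length_append, List.length_cons, List.length_nil]; omega

-- Folding Set.add keeps the full length exactly when the new elements are
-- pairwise distinct and fresh with respect to the accumulator.
theorem pv_foldl_add_len (l : List String) : ∀ s : List String,
    ((l.foldl PySem.Set.add s).length = s.length + l.length) ↔
      (l.Nodup ∧ ∀ x ∈ l, x ∉ s) := by
  induction l with
  | nil => simp
  | cons x l ih =>
    intro s
    simp only [List.foldl_cons]
    by_cases h : x ∈ s
    · have hadd : PySem.Set.add s x = s := by
        simp only [PySem.Set.add]
        rw [if_pos (by simpa using h)]
      rw [hadd]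
      constructor
      · intro hlen
        exfalso
        have := pv_foldl_add_le l s
        simp only [List.length_cons] at hlen
        omega
      · rintro ⟨-, hfresh⟩
        exact absurd h (hfresh x (by simp))
    · have hadd : PySem.Set.add s x = s ++ [x] := by
        simp only [PySem.Set.add]
        rw [if_neg (by simpa using h)]
      rw [hadd,
        show s.length + (x :: l).length = (s ++ [x]).length + l.length by
          simp only [List.length_append, List.length_cons, List.length_nil]; omega,
        ih (s ++ [x])]
      simp only [List.nodup_cons, List.mem_append, List.mem_cons, List.not_mem_nil, or_false]
      constructor
      · rintro ⟨hnd, hfresh⟩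
        refine ⟨⟨fun hx => ?_, hnd⟩, fun y hy => ?_⟩
        · exact (hfresh x hx) (Or.inr rfl)
        · rcases hy with rfl | hy
          · exact h
          · exact fun hys => (hfresh y hy) (Or.inl hys)
      · rintro ⟨⟨hxl, hnd⟩, hfresh⟩
        refine ⟨hnd, fun y hy hmem => ?_⟩
        rcases hmem with hys | rfl
        · exact (hfresh y (Or.inr hy)) hys
        · exact hxl hy

-- len(l) == len(set(l)) exactly when l has no duplicates.
theorem pv_set_len_iff (l : List String) :
    ((PySem.Set.ofList l).length = l.length) ↔ l.Nodup := by
  rw [PySem.Set.ofList_eq_foldl]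
  have := pv_foldl_add_len l []
  simpa using this

-- len(predicate + "(") = len(predicate) + 1
theorem pv_len_prefix (predicate : String) :
    (PySem.Str.len (predicate ++ "(") : Int) = (PySem.Str.len predicate : Int) + 1 := by
  simp [PySem.Str.len]

-- Characterisation of A's loop: true iff the positions extracted from the
-- remaining facts are pairwise distinct and avoid the accumulator.
theorem pv_loop_char (predicate : String) (facts : List String) : ∀ seen : List String,
    (pvA_loop predicate facts seen = true) ↔
      ((facts.filterMap (fun f => pvPosition? f (predicate ++ "("))).Nodup ∧
        ∀ p ∈ facts.filterMap (fun f => pvPosition? f (predicate ++ "(")), p ∉ seen) := by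
  induction facts with
  | nil => intro seen; simp [pvA_loop]
  | cons fact rest ih =>
    intro seen
    rw [pvA_loop]
    by_cases hsw : PySem.Str.startswith fact (predicate ++ "(") = true
    · have hpos : pvPosition? fact (predicate ++ "(") =
        match (PySem.Str.splitMax? (PySem.Str.slice fact (some ((PySem.Str.len predicate : Int) + 1)) (some (-1))) ", " 1).getD [] with
        | _ :: pos :: _ => some pos
        | _ => none := by
        rw [pvPosition?, pv_len_prefix, if_pos hsw]
      rw [if_pos hsw]
      cases hparts : (PySem.Str.splitMax? (PySem.Str.slice fact (some ((PySem.Str.len predicate : Int) + 1)) (some (-1))) ", " 1).getD [] with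
      | nil =>
        have hnone : pvPosition? fact (predicate ++ "(") = none := by rw [hpos, hparts]
        simp only [hparts, List.filterMap_cons, hnone]
        exact ih seen
      | cons a tl =>
        cases tl with
        | nil =>
          have hnone : pvPosition? fact (predicate ++ "(") = none := by rw [hpos, hparts]
          simp only [hparts, List.filterMap_cons, hnone]
          exact ih seen
        | cons pos tl' =>
          have hsome : pvPosition? fact (predicate ++ "(") = some pos := by rw [hpos, hparts]
          simp only [hparts, List.filterMap_cons, hsome]
          by_cases hmem : seen.contains pos = true
          · have hm : pos ∈ seen := by simpa using hmem
            rw [if_pos hmem]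
            simp only [Bool.false_eq_true, false_iff]
            rintro ⟨-, hall⟩
            exact hall pos (by simp) hm
          · have hm : pos ∉ seen := by simpa using hmem
            rw [if_neg hmem, ih (seen ++ [pos])]
            simp only [List.nodup_cons, List.mem_cons, List.mem_append, List.not_mem_nil, or_false]
            constructor
            · rintro ⟨hnd, hfresh⟩
              refine ⟨⟨fun hc => (hfresh pos hc) (Or.inr rfl), hnd⟩, fun p hp => ?_⟩
              rcases hp with rfl | hp
              · exact hm
              · exact fun hps => (hfresh p hp) (Or.inl hps)
            · rintro ⟨⟨hpos', hnd⟩, hfresh⟩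
              refine ⟨hnd, fun p hp hmem' => ?_⟩
              rcases hmem' with hps | rfl
              · exact (hfresh p (Or.inr hp)) hps
              · exact hpos' hp
    · have hnone : pvPosition? fact (predicate ++ "(") = none := by
        rw [pvPosition?, if_neg hsw]
      rw [if_neg hsw]
      simp only [List.filterMap_cons, hnone]
      exact ih seen

-- ===== VERDICT (by name: the statement is the Claim_ definition above) =====
theorem no_duplicate_positions_spec : Claim_equal_no_duplicate_positions := by
  intro facts predicate _
  unfold Spec_no_duplicate_positions no_duplicate_positions no_duplicate_positions_alt
  rw [Bool.eq_iff_iff, pv_loop_char]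
  have hset := pv_set_len_iff (facts.filterMap (fun f => pvPosition? f (predicate ++ "(")))
  constructor
  · rintro ⟨hnd, -⟩
    simp [hset.mpr hnd]
  · intro hB
    refine ⟨hset.mp ?_, by simp⟩
    have := of_decide_eq_true (by simpa [beq_iff_eq] using hB)
    omega
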